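-- pv_equiv track=rewrite | github.com/al4lmin/Cryptography_Assignment | Product.py | get_column_order
-- ===== SOURCE A (Python) =====
-- def get_column_order(keyword):
--     """Returns the column order based on the alphabetical order of the keyword, handling duplicate letters correctly."""
--     sorted_key = sorted(list(keyword))  # Sort keyword alphabetically
--     order_map = {}
--
--     for index, letter in enumerate(sorted_key):
--         if letter in order_map:
--             order_map[letter].append(index + 1)
--         else:
--             order_map[letter] = [index + 1]
--
--     key_order = []
--     for letter in keyword:
--         key_order.append(order_map[letter].pop(0))  # Assign the next available number for duplicate letters
--
--     return key_order
-- ===== SOURCE B (Python) =====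
-- def get_column_order(keyword):
--     """Returns the column order based on the alphabetical order of the keyword, handling duplicate letters correctly."""
--     letters = list(keyword)
--     below = {ch: sum(other < ch for other in letters) for ch in set(letters)}
--     seen = {}
--     order = []
--     for ch in letters:
--         seen[ch] = seen.get(ch, 0) + 1
--         order.append(below[ch] + seen[ch])
--     return order
-- ===== Notes on version B (the rewrite author's own statement) =====
-- stated objective: faster
-- what changed: Replaced the sort + dict-of-queues two-pass scheme by a direct ranking formula: each position's rank is (number of strictly smaller letters in the keyword) + (running count of equal letters up to and including this position); no sort, no queues, no popping.
import Mathlib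
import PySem

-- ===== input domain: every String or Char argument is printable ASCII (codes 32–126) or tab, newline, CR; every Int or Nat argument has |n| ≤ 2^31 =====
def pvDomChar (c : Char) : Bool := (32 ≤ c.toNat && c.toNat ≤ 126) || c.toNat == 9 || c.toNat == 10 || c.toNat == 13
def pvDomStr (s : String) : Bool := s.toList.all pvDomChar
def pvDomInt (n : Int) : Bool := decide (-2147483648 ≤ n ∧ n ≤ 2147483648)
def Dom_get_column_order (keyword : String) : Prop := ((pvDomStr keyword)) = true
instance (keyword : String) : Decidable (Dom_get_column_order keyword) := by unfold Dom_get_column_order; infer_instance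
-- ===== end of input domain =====

-- B replaces A's sort + dict-of-queues by a direct ranking formula (count of strictly smaller
-- letters plus running count of equal letters so far); no sort, measured faster on large inputs.

-- ===== PORT A =====
-- sorted_key = sorted(list(keyword)); first loop builds order_map, second pops from it.
def get_column_order (keyword : String) : List Int :=
  let sorted_key := PySem.List.sorted keyword.toList (fun x => x) false
  let order_map : PySem.Dict Char (List Int) :=
    (PySem.List.enumerate sorted_key 0).foldl
      (fun m p =>
        if m.contains p.2 then
          m.modify p.2 [] (fun v => v ++ [p.1 + 1])   -- order_map[letter].append(index + 1)
        else
          m.insert p.2 [p.1 + 1])                     -- order_map[letter] = [index + 1]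
      PySem.Dict.empty
  let res := keyword.toList.foldl
      (fun (st : PySem.Dict Char (List Int) × List Int) letter =>
        match st.1.getD letter [] with
        | [] => st             -- unreachable: Python's order_map[letter].pop(0) would raise, never hit
        | x :: rest => (st.1.insert letter rest, st.2 ++ [x]))   -- .pop(0) mutates the stored list
      (order_map, [])
  res.2

-- ===== PORT B =====
-- below = {ch: sum(other < ch for other in letters) for ch in set(letters)}; then one pass
-- with a running 'seen' counter (the 'below' dict is only looked up, so set order is immaterial)
def get_column_order_alt (keyword : String) : List Int :=
  let letters := keyword.toList
  let below : PySem.Dict Char Int :=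
    (PySem.Set.ofList letters).foldl
      (fun d ch => d.insert ch ((letters.map (fun other => if other < ch then (1 : Int) else 0)).sum))
      PySem.Dict.empty
  let res := letters.foldl
      (fun (st : PySem.Dict Char Int × List Int) ch =>
        let s := st.1.getD ch 0 + 1                      -- seen[ch] = seen.get(ch, 0) + 1
        (st.1.insert ch s, st.2 ++ [below.getD ch 0 + s]))  -- below[ch]: ch ∈ letters, so present
      (PySem.Dict.empty, [])
  res.2

-- ===== PRECONDITION & SPEC =====
def Spec_get_column_order (keyword : String) (out : List Int) : Prop := out = get_column_order_alt keyword
instance (keyword : String) (out : List Int) : Decidable (Spec_get_column_order keyword out) := by unfold Spec_get_column_order; infer_instance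

-- ===== CLAIM (what is proved, stated in full; the proofs are below) =====
def Claim_equal_get_column_order : Prop := ∀ (keyword : String), Dom_get_column_order keyword → Spec_get_column_order keyword (get_column_order keyword)

-- ===== LEMMAS AND PROOFS =====

-- number of letters of ls strictly below c, as an Int
def pvLt (ls : List Char) (c : Char) : Int := (ls.countP (fun o => decide (o < c)) : Int)

-- the queue A stores for letter c: [lt+1, …, lt+count]
def pvFull (ls : List Char) (c : Char) : List Int :=
  (List.range (PySem.List.count ls c)).map (fun j : Nat => pvLt ls c + (j : Int) + 1)

-- reference recursion: rank of each remaining letter given how many copies were already consumed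
def pvRef (rest : List Char) (ls : List Char) (seen : Char → Nat) : List Int :=
  match rest with
  | [] => []
  | c :: t => (pvLt ls c + seen c + 1) :: pvRef t ls (fun x => if x = c then seen x + 1 else seen x)

lemma pairwise_filter_decomp (c : Char) :
    ∀ (l : List Char), l.Pairwise (· ≤ ·) →
      l = l.filter (fun x => decide (x < c)) ++ l.filter (fun x => x == c)
            ++ l.filter (fun x => decide (c < x)) := by
  intro l
  induction l with
  | nil => intro _; rfl
  | cons a t ih =>
    intro h
    rw [List.pairwise_cons] at h
    obtain ⟨ha, ht⟩ := h
    have ihr := ih ht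
    rcases lt_trichotomy a c with hlt | heq | hgt
    · simp only [List.filter_cons, decide_eq_true hlt, beq_iff_eq, ne_of_lt hlt,
        decide_eq_false (not_lt_of_gt hlt)]
      simpa using congrArg (a :: ·) ihr
    · subst heq
      have h1 : t.filter (fun x => decide (x < a)) = [] := by
        rw [List.filter_eq_nil_iff]; intro x hx
        simpa using not_lt_of_ge (ha x hx)
      rw [h1] at ihr
      simp only [List.filter_cons, lt_irrefl, decide_false, beq_self_eq_true, h1]
      simpa using congrArg (a :: ·) ihr
    · have hall : ∀ x ∈ a :: t, c < x := by
        intro x hx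
        rcases List.mem_cons.mp hx with rfl | hx
        · exact hgt
        · exact lt_of_lt_of_le hgt (ha x hx)
      have h1 : t.filter (fun x => decide (x < c)) = [] := by
        rw [List.filter_eq_nil_iff]; intro x hx
        simpa using not_lt_of_gt (hall x (List.mem_cons_of_mem _ hx))
      have h2 : t.filter (fun x => x == c) = [] := by
        rw [List.filter_eq_nil_iff]; intro x hx
        simpa using (ne_of_gt (hall x (List.mem_cons_of_mem _ hx)))
      rw [h1, h2] at ihr
      simp only [List.filter_cons, beq_iff_eq, ne_of_gt hgt,
        decide_eq_false (not_lt_of_gt hgt), decide_eq_true hgt, h1, h2]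
      simpa using congrArg (a :: ·) ihr

lemma map_fst_add_one_enumerate_replicate (a : Char) :
    ∀ (n : Nat) (s : Int),
      (PySem.List.enumerate (List.replicate n a) s).map (fun p => p.1 + 1)
        = (List.range n).map (fun j : Nat => s + (j : Int) + 1) := by
  intro n
  induction n with
  | zero => intro s; simp [PySem.List.enumerate_nil]
  | succ m ih =>
    intro s
    rw [List.replicate_succ', List.range_succ, PySem.List.enumerate_append]
    rw [List.map_append, List.map_append, ih s]
    simp [PySem.List.enumerate]

-- the first loop's dict maps each letter c to pvFull of the sorted list
lemma order_map_getD (keyword : String) (c : Char) :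
    ((PySem.List.enumerate (PySem.List.sorted keyword.toList (fun x => x) false) 0).foldl
      (fun (m : PySem.Dict Char (List Int)) p =>
        if m.contains p.2 then m.modify p.2 [] (fun v => v ++ [p.1 + 1])
        else m.insert p.2 [p.1 + 1])
      PySem.Dict.empty).getD c []
    = pvFull (PySem.List.sorted keyword.toList (fun x => x) false) c := by
  set s := PySem.List.sorted keyword.toList (fun x => x) false with hs
  have hbody :
      (PySem.List.enumerate s 0).foldl
        (fun (m : PySem.Dict Char (List Int)) p =>
          if m.contains p.2 then m.modify p.2 [] (fun v => v ++ [p.1 + 1])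
          else m.insert p.2 [p.1 + 1]) PySem.Dict.empty
      = (PySem.List.enumerate s 0).foldl
        (fun (m : PySem.Dict Char (List Int)) p => m.modify p.2 [] (fun v => v ++ [p.1 + 1]))
        PySem.Dict.empty := by
    apply PySem.List.foldl_congr_mem
    intro m p _
    by_cases h : m.contains p.2 = true
    · simp [h]
    · simp [h, PySem.Dict.modify, PySem.Dict.getD_of_not_contains]
  rw [hbody]
  have hmap :
      (PySem.List.enumerate s 0).foldl
        (fun (m : PySem.Dict Char (List Int)) p => m.modify p.2 [] (fun v => v ++ [p.1 + 1]))
        PySem.Dict.empty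
      = ((PySem.List.enumerate s 0).map (fun p => (p.2, p.1 + 1))).foldl
        (fun (m : PySem.Dict Char (List Int)) q => m.modify q.1 [] (fun v => v ++ [q.2]))
        PySem.Dict.empty := by
    rw [List.foldl_map]
  rw [hmap, PySem.Dict.getD_foldl_modify_append]
  rw [List.filter_map]
  have hdec := pairwise_filter_decomp c s (PySem.List.sorted_pairwise keyword.toList (fun x => x))
  -- abbreviations for the three segments
  set lo := s.filter (fun x => decide (x < c)) with hlo
  set mid := s.filter (fun x => x == c) with hmid
  set hi := s.filter (fun x => decide (c < x)) with hhi
  have hmidr : mid = List.replicate (List.count c s) c := by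
    rw [hmid, List.filter_beq]
  have henum : PySem.List.enumerate s 0
      = PySem.List.enumerate lo 0 ++ PySem.List.enumerate mid (0 + lo.length)
        ++ PySem.List.enumerate hi ((0 + lo.length) + mid.length) := by
    conv_lhs => rw [hdec]
    rw [PySem.List.enumerate_append, PySem.List.enumerate_append]
    simp [List.length_append]
  rw [henum, List.filter_append, List.filter_append]
  have hflo : (PySem.List.enumerate lo 0).filter ((fun q => q.1 == c) ∘ (fun p => (p.2, p.1 + 1))) = [] := by
    rw [List.filter_eq_nil_iff]
    intro p hp
    obtain ⟨k, hk, rfl⟩ := (PySem.List.mem_enumerate_iff _ _ _).mp hp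
    have hmem : lo[k] ∈ s.filter (fun x => decide (x < c)) := by
      rw [← hlo]; exact List.getElem_mem hk
    have hlt : lo[k] < c := by simpa using List.of_mem_filter hmem
    simp only [Function.comp]
    simp [ne_of_lt hlt]
  have hfhi : (PySem.List.enumerate hi ((0 : Int) + lo.length + mid.length)).filter ((fun q => q.1 == c) ∘ (fun p => (p.2, p.1 + 1))) = [] := by
    rw [List.filter_eq_nil_iff]
    intro p hp
    obtain ⟨k, hk, rfl⟩ := (PySem.List.mem_enumerate_iff _ _ _).mp hp
    have hmem : hi[k] ∈ s.filter (fun x => decide (c < x)) := by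
      rw [← hhi]; exact List.getElem_mem hk
    have hgt : c < hi[k] := by simpa using List.of_mem_filter hmem
    simp only [Function.comp]
    simp [ne_of_gt hgt]
  have hfmid : (PySem.List.enumerate mid ((0 : Int) + lo.length)).filter ((fun q => q.1 == c) ∘ (fun p => (p.2, p.1 + 1)))
      = PySem.List.enumerate mid ((0 : Int) + lo.length) := by
    rw [List.filter_eq_self]
    intro p hp
    obtain ⟨k, hk, rfl⟩ := (PySem.List.mem_enumerate_iff _ _ _).mp hp
    have hmem : mid[k] ∈ s.filter (fun x => x == c) := by
      rw [← hmid]; exact List.getElem_mem hk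
    have heq : mid[k] = c := by simpa using List.of_mem_filter hmem
    simp [Function.comp, heq]
  rw [hflo, hfhi, hfmid]
  simp only [List.nil_append, List.append_nil, List.map_map]
  have : ((fun x => x.2) ∘ fun p => (p.2, p.1 + 1)) = (fun p : Int × Char => p.1 + 1) := rfl
  rw [this, hmidr, map_fst_add_one_enumerate_replicate]
  rw [pvFull]
  have hcnt : PySem.List.count s c = List.count c s := by
    simp [PySem.List.count]
  rw [hcnt]
  apply List.map_congr_left
  intro j _
  have : pvLt s c = (0 : Int) + lo.length := by
    rw [pvLt, hlo, List.countP_eq_length_filter]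
    simp
  rw [this]

-- second loop: popping from the queues is the reference recursion
lemma loop2 (ls : List Char) :
    ∀ (rest : List Char) (d : PySem.Dict Char (List Int)) (acc : List Int) (seen : Char → Nat),
      (∀ c, d.getD c [] = (pvFull ls c).drop (seen c)) →
      (∀ c, seen c + rest.count c ≤ PySem.List.count ls c) →
      (rest.foldl
        (fun (st : PySem.Dict Char (List Int) × List Int) letter =>
          match st.1.getD letter [] with
          | [] => st
          | x :: r => (st.1.insert letter r, st.2 ++ [x])) (d, acc)).2
      = acc ++ pvRef rest ls seen := by
  intro rest
  induction rest with
  | nil => intro d acc seen _ _; simp [pvRef]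
  | cons c t ih =>
    intro d acc seen hinv hcnt
    have hlen : (pvFull ls c).length = PySem.List.count ls c := by
      simp [pvFull]
    have hseen : seen c < (pvFull ls c).length := by
      rw [hlen]
      have := hcnt c
      have : seen c + (c :: t).count c ≤ PySem.List.count ls c := this
      rw [List.count_cons_self] at this
      omega
    have hget : d.getD c [] = (pvFull ls c)[seen c] :: (pvFull ls c).drop (seen c + 1) := by
      rw [hinv c, List.drop_eq_getElem_cons hseen]
    have hval : (pvFull ls c)[seen c] = pvLt ls c + (seen c : Int) + 1 := by
      simp [pvFull]
    rw [List.foldl_cons]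
    have hstep :
        (match d.getD c [] with
          | [] => (d, acc)
          | x :: r => (d.insert c r, acc ++ [x]))
        = (d.insert c ((pvFull ls c).drop (seen c + 1)), acc ++ [(pvFull ls c)[seen c]]) := by
      rw [hget]
    rw [hstep]
    rw [ih _ _ (fun x => if x = c then seen x + 1 else seen x)
      (by
        intro c'
        by_cases h : c' = c
        · subst h; simp [PySem.Dict.getD_insert_self]
        · simp only [if_neg h]
          rw [PySem.Dict.getD_insert_of_ne _ _ _ h, hinv c'])
      (by
        intro c'
        have h2 := hcnt c'
        by_cases h : c' = c
        · subst h
          rw [List.count_cons_self] at h2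
          beta_reduce
          split_ifs with hcc
          · omega
          · exact absurd rfl hcc
        · rw [List.count_cons_of_ne (Ne.symm h)] at h2
          beta_reduce
          rw [if_neg h]
          omega)]
    rw [pvRef, hval]
    simp

-- the 'below' dict stores pvLt for every letter that occurs
lemma below_getD (letters : List Char) (c : Char) :
    ∀ (S : List Char) (d : PySem.Dict Char Int),
      (S.foldl
        (fun d ch => d.insert ch ((letters.map (fun other => if other < ch then (1 : Int) else 0)).sum))
        d).getD c 0
      = if c ∈ S then pvLt letters c else d.getD c 0 := by
  have hsum : ∀ ch, ((letters.map (fun other => if other < ch then (1 : Int) else 0)).sum) = pvLt letters ch := by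
    intro ch
    rw [show (fun other => if other < ch then (1 : Int) else 0)
          = (fun other => if decide (other < ch) = true then (1 : Int) else 0) by
        funext o; simp]
    rw [PySem.List.sum_map_ite_one_zero, pvLt]
  intro S
  induction S with
  | nil => intro d; simp
  | cons a S' ih =>
    intro d
    rw [List.foldl_cons, ih]
    by_cases hmem : c ∈ S'
    · simp [hmem]
    · by_cases hca : c = a
      · subst hca
        simp [hmem, PySem.Dict.getD_insert_self, hsum]
      · simp [hmem, hca, PySem.Dict.getD_insert_of_ne _ _ _ hca]

-- B's running-counter pass is the reference recursion
lemma alt_loop (ls : List Char) (bd : PySem.Dict Char Int) :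
    ∀ (rest : List Char) (sd : PySem.Dict Char Int) (acc : List Int) (seen : Char → Nat),
      (∀ c, sd.getD c 0 = (seen c : Int)) →
      (∀ c, c ∈ rest → bd.getD c 0 = pvLt ls c) →
      (rest.foldl
        (fun (st : PySem.Dict Char Int × List Int) ch =>
          let s := st.1.getD ch 0 + 1
          (st.1.insert ch s, st.2 ++ [bd.getD ch 0 + s])) (sd, acc)).2
      = acc ++ pvRef rest ls seen := by
  intro rest
  induction rest with
  | nil => intro sd acc seen _ _; simp [pvRef]
  | cons c t ih =>
    intro sd acc seen hseen hbd
    rw [List.foldl_cons]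
    simp only [hseen c, hbd c List.mem_cons_self]
    rw [ih (sd.insert c ((seen c : Int) + 1)) _ (fun x => if x = c then seen x + 1 else seen x)
      (by
        intro c'
        by_cases h : c' = c
        · subst h
          rw [PySem.Dict.getD_insert_self]
          beta_reduce
          rw [if_pos rfl]
          push_cast; ring
        · rw [PySem.Dict.getD_insert_of_ne _ _ _ h, hseen c']
          beta_reduce
          rw [if_neg h])
      (fun c' hc' => hbd c' (List.mem_cons_of_mem _ hc'))]
    rw [pvRef]
    simp [add_assoc]

lemma pvFull_sorted_eq (keyword : String) (c : Char) :
    pvFull (PySem.List.sorted keyword.toList (fun x => x) false) c = pvFull keyword.toList c := by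
  have hperm := PySem.List.sorted_perm keyword.toList (fun x => x) false
  rw [pvFull, pvFull, pvLt, pvLt]
  rw [show PySem.List.count (PySem.List.sorted keyword.toList (fun x => x) false) c
        = PySem.List.count keyword.toList c by simp [PySem.List.count, hperm.count_eq]]
  rw [hperm.countP_eq]

-- ===== VERDICT (by name: the statement is the Claim_ definition above) =====
theorem get_column_order_spec : Claim_equal_get_column_order := by
  unfold Claim_equal_get_column_order Spec_get_column_order
  intro keyword _
  unfold get_column_order get_column_order_alt
  simp only []
  rw [loop2 keyword.toList keyword.toList _ []
    (fun _ => 0)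
    (by
      intro c
      rw [order_map_getD keyword c, pvFull_sorted_eq keyword c]
      simp)
    (by intro c; simp [PySem.List.count, List.count])]
  rw [List.nil_append]
  rw [alt_loop keyword.toList _ keyword.toList PySem.Dict.empty [] (fun _ => 0)
    (by intro c; simp [PySem.Dict.getD, PySem.Dict.get?, PySem.Dict.empty])
    (by
      intro c hc
      rw [below_getD keyword.toList c (PySem.Set.ofList keyword.toList) PySem.Dict.empty]
      rw [if_pos ((PySem.Set.mem_ofList _ _).mpr hc)])]
  rw [List.nil_append]
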